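-- pv_equiv track=rewrite | github.com/AayushSabharwal/Python-Backup | Projects/Sudoku/SudokuSolver.py | find_next_empty
-- ===== SOURCE A (Python) =====
-- def find_next_empty(r, c, grid):
--       for j in range(c, 9):
--             if(grid[r][j] == 0):
--                   return r, j
--
--       for i in range(r + 1, 9):
--             for j in range(9):
--                   if(grid[i][j] == 0):
--                         return i, j
--       return -1, -1
-- ===== SOURCE B (Python) =====
-- def find_next_empty(r, c, grid):
--       # tail-recursive cell-by-cell descent instead of two iterative loops:
--       # advance one cell at a time, roll over to the next row when c reaches 9
--       if r >= 9:
--             return -1, -1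
--       if c >= 9:
--             return find_next_empty(r + 1, 0, grid)
--       if grid[r][c] == 0:
--             return r, c
--       return find_next_empty(r, c + 1, grid)
-- ===== Notes on version B (the rewrite author's own statement) =====
-- stated objective: alternative
-- what changed: Replaces A's two iterative loops (partial-row loop plus nested row/column sweep) by a tail-recursive cell-by-cell descent that advances (r,c) one cell at a time and rolls over to the next row when c reaches 9.
-- outside the precondition, e.g. on find_next_empty(0, -1, [[0, 0, 0, 0, 0, 0, 0, 0, 0]]): A returns (0, -1), B returns (0, -1); on find_next_empty(-3, 9, [[0], [0]]): A returns (-2, 0), B returns (-2, 0)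
import Mathlib
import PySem

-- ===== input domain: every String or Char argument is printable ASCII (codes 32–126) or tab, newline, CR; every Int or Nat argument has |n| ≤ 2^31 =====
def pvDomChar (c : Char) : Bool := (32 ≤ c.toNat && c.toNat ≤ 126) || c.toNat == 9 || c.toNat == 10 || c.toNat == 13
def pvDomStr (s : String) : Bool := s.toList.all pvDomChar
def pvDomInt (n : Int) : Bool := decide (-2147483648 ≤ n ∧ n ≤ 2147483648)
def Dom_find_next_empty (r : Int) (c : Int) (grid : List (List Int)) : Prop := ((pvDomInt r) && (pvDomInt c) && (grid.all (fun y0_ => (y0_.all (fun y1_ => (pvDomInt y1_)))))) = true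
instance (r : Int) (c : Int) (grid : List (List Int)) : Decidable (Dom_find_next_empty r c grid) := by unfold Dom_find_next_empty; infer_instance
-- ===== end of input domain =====

-- B replaces A's two iterative loops by a tail-recursive cell-by-cell descent
-- (alternative decomposition, same cost).

-- ===== PORT A =====
-- grid[i][j]: under Pre_ every access is in range, so pyGetD's default is never read
-- (out of range Python raises IndexError; those inputs are excluded by Pre_).
def find_next_empty (r : Int) (c : Int) (grid : List (List Int)) : Int × Int :=
  match (PySem.List.pyRange c 9 1).findSome? (fun j =>
      if PySem.List.pyGetD (PySem.List.pyGetD grid r []) j 0 = 0 then some (r, j) else none) with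
  | some p => p
  | none =>
    match (PySem.List.pyRange (r + 1) 9 1).findSome? (fun i =>
        (PySem.List.pyRange 0 9 1).findSome? (fun j =>
          if PySem.List.pyGetD (PySem.List.pyGetD grid i []) j 0 = 0 then some (i, j) else none)) with
    | some p => p
    | none => (-1, -1)

-- ===== PORT B =====
-- tail recursion on the cell (r, c); grid[r][c] as pyGetD (in range under Pre_)
def find_next_empty_alt (r : Int) (c : Int) (grid : List (List Int)) : Int × Int :=
  if _h9 : 9 ≤ r then (-1, -1)
  else if _hc : 9 ≤ c then find_next_empty_alt (r + 1) 0 grid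
  else if PySem.List.pyGetD (PySem.List.pyGetD grid r []) c 0 = 0 then (r, c)
  else find_next_empty_alt r (c + 1) grid
termination_by ((9 - r).toNat, (9 - c).toNat)
decreasing_by
  · exact Prod.Lex.left _ _ (by omega)
  · exact Prod.Lex.right _ (by omega)

-- ===== PRECONDITION & SPEC =====
-- Pre_ excludes off-board starts — negative column starts (c < 0) and row starts outside
-- [-len(grid), 9) with c < 9 — where A raises IndexError or returns via Python's accidental
-- negative-index wraparound / scan of rows beyond the 9x9 board; it also excludes calls whose
-- scan reaches an out-of-range cell before any 0, on which A raises IndexError.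
-- cell index t (row t/9, column t%9) is in range of the grid
def pvCellOk (grid : List (List Int)) (t : Int) : Bool :=
  decide (PySem.Raise.InRange grid.length (PySem.Int.floordiv t 9)) &&
  decide (PySem.Raise.InRange (PySem.List.pyGetD grid (PySem.Int.floordiv t 9) []).length (PySem.Int.mod t 9))

-- cell index t is in range and holds a 0
def pvCellZero (grid : List (List Int)) (t : Int) : Bool :=
  pvCellOk grid t &&
  decide (PySem.List.pyGetD (PySem.List.pyGetD grid (PySem.Int.floordiv t 9) []) (PySem.Int.mod t 9) 0 = 0)

def Pre_find_next_empty (r : Int) (c : Int) (grid : List (List Int)) : Prop :=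
  ((-(grid.length : Int) ≤ r ∧ r < 9 ∧ 0 ≤ c) ∧
    -- no out-of-range cell is reached: each one is preceded by an in-range 0 that A returns at
    ∀ t ∈ PySem.List.pyRange (r * 9 + min c 9) 81 1, pvCellOk grid t = false →
      ∃ s ∈ PySem.List.pyRange (r * 9 + min c 9) 81 1, s < t ∧ pvCellZero grid s = true)
  ∨ (9 ≤ r ∧ 9 ≤ c)
instance (r : Int) (c : Int) (grid : List (List Int)) : Decidable (Pre_find_next_empty r c grid) := by unfold Pre_find_next_empty; infer_instance

def pvWitness_find_next_empty : Int × Int × List (List Int) :=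
  (0, 0, [[5,3,0,0,7,0,0,0,0],[6,0,0,1,9,5,0,0,0],[0,9,8,0,0,0,0,6,0],
          [8,0,0,0,6,0,0,0,3],[4,0,0,8,0,3,0,0,1],[7,0,0,0,2,0,0,0,6],
          [0,6,0,0,0,0,2,8,0],[0,0,0,4,1,9,0,0,5],[0,0,0,0,8,0,0,7,9]])

def Spec_find_next_empty (r : Int) (c : Int) (grid : List (List Int)) (out : Int × Int) : Prop := out = find_next_empty_alt r c grid
instance (r : Int) (c : Int) (grid : List (List Int)) (out : Int × Int) : Decidable (Spec_find_next_empty r c grid out) := by unfold Spec_find_next_empty; infer_instance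

-- ===== CLAIM (what is proved, stated in full; the proofs are below) =====
def Claim_equal_find_next_empty : Prop := ∀ (r : Int) (c : Int) (grid : List (List Int)), Dom_find_next_empty r c grid → Pre_find_next_empty r c grid → Spec_find_next_empty r c grid (find_next_empty r c grid)

-- ===== LEMMAS AND PROOFS =====

-- B's scan of the rest of row r equals A's first-loop findSome?, falling through to row r+1
theorem pv_row_step (grid : List (List Int)) :
    ∀ (n : Nat) (r c : Int), r < 9 → c ≤ 9 → (9 - c).toNat = n →
    find_next_empty_alt r c grid =
      (match (PySem.List.pyRange c 9 1).findSome? (fun j =>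
          if PySem.List.pyGetD (PySem.List.pyGetD grid r []) j 0 = 0 then some (r, j) else none) with
       | some p => p
       | none => find_next_empty_alt (r + 1) 0 grid) := by
  intro n
  induction n with
  | zero =>
    intro r c hr hc hn
    have hc9 : c = 9 := by omega
    subst hc9
    rw [find_next_empty_alt, dif_neg (by omega), dif_pos (by omega),
        PySem.List.pyRange_one_eq_nil (by omega)]
    simp
  | succ n ih =>
    intro r c hr hc hn
    have hclt : c < 9 := by omega
    rw [find_next_empty_alt, dif_neg (by omega), dif_neg (by omega),
        PySem.List.pyRange_one_cons hclt]
    by_cases h0 : PySem.List.pyGetD (PySem.List.pyGetD grid r []) c 0 = 0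
    · simp [h0, List.findSome?]
    · simp only [List.findSome?_cons, if_neg h0]
      exact ih r (c + 1) hr (by omega) (by omega)

-- B's full scan from row r, column 0 equals A's nested second loop
theorem pv_rows (grid : List (List Int)) :
    ∀ (n : Nat) (r : Int), (9 - r).toNat = n →
    find_next_empty_alt r 0 grid =
      (match (PySem.List.pyRange r 9 1).findSome? (fun i =>
          (PySem.List.pyRange 0 9 1).findSome? (fun j =>
            if PySem.List.pyGetD (PySem.List.pyGetD grid i []) j 0 = 0 then some (i, j) else none)) with
       | some p => p
       | none => (-1, -1)) := by
  intro n
  induction n with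
  | zero =>
    intro r hn
    have h9r : (9:Int) ≤ r := by omega
    rw [find_next_empty_alt, dif_pos h9r, PySem.List.pyRange_one_eq_nil h9r]
    simp
  | succ n ih =>
    intro r hn
    have hr : r < 9 := by omega
    rw [pv_row_step grid 9 r 0 hr (by omega) (by decide),
        PySem.List.pyRange_one_cons hr, List.findSome?_cons]
    cases hrow : (PySem.List.pyRange 0 9 1).findSome? (fun j =>
        if PySem.List.pyGetD (PySem.List.pyGetD grid r []) j 0 = 0 then some (r, j) else none) with
    | some p => simp
    | none => exact ih (r + 1) (by omega)

-- ===== VERDICT (by name: the statement is the Claim_ definition above) =====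
theorem find_next_empty_spec : Claim_equal_find_next_empty := by
  intro r c grid _ hpre
  unfold Spec_find_next_empty find_next_empty
  rcases hpre with ⟨⟨-, hr9, -⟩, -⟩ | ⟨hr9, hc9⟩
  case inr =>
    -- past the board: every loop of A is empty, and B returns at once
    rw [PySem.List.pyRange_one_eq_nil (by omega : (9:Int) ≤ c),
        PySem.List.pyRange_one_eq_nil (by omega : (9:Int) ≤ r + 1),
        find_next_empty_alt, dif_pos hr9]
    simp
  by_cases hc : (9:Int) ≤ c
  · -- first loop empty on both sides; B rolls straight over to row r + 1
    rw [PySem.List.pyRange_one_eq_nil hc, find_next_empty_alt,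
        dif_neg (by omega), dif_pos hc, pv_rows grid (9 - (r + 1)).toNat (r + 1) rfl]
    simp
  · rw [pv_row_step grid (9 - c).toNat r c hr9 (by omega) rfl,
        pv_rows grid (9 - (r + 1)).toNat (r + 1) rfl]
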